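-- pv_equiv track=rewrite | github.com/sajjadium/ctf-archives | ctfs/Balsn/2022/pwn/sentinel/share/instanceManager.py | checkInstanceId
-- ===== SOURCE A (Python) =====
-- import string
--
-- def checkInstanceId(instanceId):
--     if len(instanceId)!=32:
--         return False
--     instanceIdCSET = set(string.ascii_lowercase+string.digits)
--     for c in instanceId:
--         if c not in instanceIdCSET:
--             return False
--     return True
-- ===== SOURCE B (Python) =====
-- import re
--
-- def checkInstanceId(instanceId):
--     return bool(re.fullmatch(r'[a-z0-9]{32}', instanceId))
-- ===== Notes on version B (the rewrite author's own statement) =====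
-- stated objective: idiomatic
-- what changed: Replaced the explicit length guard plus per-character set-membership loop with a single re.fullmatch of [a-z0-9]{32}, one regex-engine scan.
import Mathlib
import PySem

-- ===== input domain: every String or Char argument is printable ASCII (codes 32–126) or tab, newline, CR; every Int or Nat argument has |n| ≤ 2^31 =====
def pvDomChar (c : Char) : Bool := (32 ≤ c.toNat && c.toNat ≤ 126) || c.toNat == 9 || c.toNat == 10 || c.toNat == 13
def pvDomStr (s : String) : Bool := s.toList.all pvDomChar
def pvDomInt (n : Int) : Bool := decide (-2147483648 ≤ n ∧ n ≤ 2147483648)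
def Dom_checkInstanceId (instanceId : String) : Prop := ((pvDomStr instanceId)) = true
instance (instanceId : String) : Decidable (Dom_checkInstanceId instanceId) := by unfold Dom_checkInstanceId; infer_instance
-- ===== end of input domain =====

-- B replaces A's length guard + early-exit per-character set-membership loop with one anchored regex match ([a-z0-9]{32}); idiomatic, same cost.

-- ===== PORT A =====
-- string.ascii_lowercase + string.digits, as a list of characters
def pvCharList : List Char :=
  ['a','b','c','d','e','f','g','h','i','j','k','l','m','n','o','p','q','r','s','t','u','v','w','x','y','z',
   '0','1','2','3','4','5','6','7','8','9']

-- instanceIdCSET = set(string.ascii_lowercase + string.digits)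
def pvCSET : PySem.Set Char := PySem.Set.ofList pvCharList

-- the early-exit 'for c in instanceId: if c not in instanceIdCSET: return False' loop
def pvLoopA : List Char → Bool
  | [] => true
  | c :: cs => if pvCSET.contains c = false then false else pvLoopA cs

def checkInstanceId (instanceId : String) : Bool :=
  if instanceId.toList.length ≠ 32 then false
  else pvLoopA instanceId.toList

-- ===== PORT B =====
-- the regex engine's anchored match of [a-z0-9]{n}: consume exactly n character-class symbols, succeed only at end of input
def pvMatchRun : List Char → Nat → Bool
  | [], 0 => true
  | [], _ + 1 => false
  | _ :: _, 0 => false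
  | c :: cs, n + 1 =>
      if (('a' ≤ c && c ≤ 'z') || ('0' ≤ c && c ≤ '9')) then pvMatchRun cs n else false

-- bool(re.fullmatch(r'[a-z0-9]{32}', instanceId))
def checkInstanceId_alt (instanceId : String) : Bool :=
  pvMatchRun instanceId.toList 32

-- ===== PRECONDITION & SPEC =====
def Spec_checkInstanceId (instanceId : String) (out : Bool) : Prop := out = checkInstanceId_alt instanceId
instance (instanceId : String) (out : Bool) : Decidable (Spec_checkInstanceId instanceId out) := by unfold Spec_checkInstanceId; infer_instance

-- ===== CLAIM (what is proved, stated in full; the proofs are below) =====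
def Claim_equal_checkInstanceId : Prop := ∀ (instanceId : String), Dom_checkInstanceId instanceId → Spec_checkInstanceId instanceId (checkInstanceId instanceId)

-- ===== LEMMAS AND PROOFS =====

theorem pv_charEq (c d : Char) : (c = d) ↔ (c.toNat = d.toNat) :=
  Iff.intro (fun h => h ▸ rfl) (fun h => Char.ext (UInt32.toNat_inj.mp h))

theorem pv_charLe (c d : Char) : (c ≤ d) ↔ (c.toNat ≤ d.toNat) := by
  rw [Char.le_def, UInt32.le_iff_toNat_le]; exact Iff.rfl

-- one character: membership in A's build-once set equals B's regex character class
theorem pv_char_class (c : Char) :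
    pvCSET.contains c = (('a' ≤ c && c ≤ 'z') || ('0' ≤ c && c ≤ '9')) := by
  have h1 : pvCSET.contains c = decide (c ∈ pvCharList) := by
    simp [PySem.Set.contains, pvCSET, PySem.Set.mem_ofList]
  rw [h1]
  have h2 : (('a' ≤ c && c ≤ 'z') || ('0' ≤ c && c ≤ '9'))
      = decide (('a' ≤ c ∧ c ≤ 'z') ∨ ('0' ≤ c ∧ c ≤ '9')) := by
    simp
  rw [h2, decide_eq_decide]
  have hc97 : ('a' : Char).toNat = 97 := rfl
  have hc98 : ('b' : Char).toNat = 98 := rfl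
  have hc99 : ('c' : Char).toNat = 99 := rfl
  have hc100 : ('d' : Char).toNat = 100 := rfl
  have hc101 : ('e' : Char).toNat = 101 := rfl
  have hc102 : ('f' : Char).toNat = 102 := rfl
  have hc103 : ('g' : Char).toNat = 103 := rfl
  have hc104 : ('h' : Char).toNat = 104 := rfl
  have hc105 : ('i' : Char).toNat = 105 := rfl
  have hc106 : ('j' : Char).toNat = 106 := rfl
  have hc107 : ('k' : Char).toNat = 107 := rfl
  have hc108 : ('l' : Char).toNat = 108 := rfl
  have hc109 : ('m' : Char).toNat = 109 := rfl
  have hc110 : ('n' : Char).toNat = 110 := rfl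
  have hc111 : ('o' : Char).toNat = 111 := rfl
  have hc112 : ('p' : Char).toNat = 112 := rfl
  have hc113 : ('q' : Char).toNat = 113 := rfl
  have hc114 : ('r' : Char).toNat = 114 := rfl
  have hc115 : ('s' : Char).toNat = 115 := rfl
  have hc116 : ('t' : Char).toNat = 116 := rfl
  have hc117 : ('u' : Char).toNat = 117 := rfl
  have hc118 : ('v' : Char).toNat = 118 := rfl
  have hc119 : ('w' : Char).toNat = 119 := rfl
  have hc120 : ('x' : Char).toNat = 120 := rfl
  have hc121 : ('y' : Char).toNat = 121 := rfl
  have hc122 : ('z' : Char).toNat = 122 := rfl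
  have hc48 : ('0' : Char).toNat = 48 := rfl
  have hc49 : ('1' : Char).toNat = 49 := rfl
  have hc50 : ('2' : Char).toNat = 50 := rfl
  have hc51 : ('3' : Char).toNat = 51 := rfl
  have hc52 : ('4' : Char).toNat = 52 := rfl
  have hc53 : ('5' : Char).toNat = 53 := rfl
  have hc54 : ('6' : Char).toNat = 54 := rfl
  have hc55 : ('7' : Char).toNat = 55 := rfl
  have hc56 : ('8' : Char).toNat = 56 := rfl
  have hc57 : ('9' : Char).toNat = 57 := rfl
  simp only [pvCharList, List.mem_cons, List.not_mem_nil, or_false, pv_charEq, pv_charLe,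
    hc97, hc98, hc99, hc100, hc101, hc102, hc103, hc104, hc105, hc106, hc107, hc108, hc109, hc110, hc111, hc112, hc113, hc114, hc115, hc116, hc117, hc118, hc119, hc120, hc121, hc122, hc48, hc49, hc50, hc51, hc52, hc53, hc54, hc55, hc56, hc57]
  omega

-- A's length-guard-plus-loop equals B's counted automaton run, for every list and count
theorem pv_main (l : List Char) (n : Nat) :
    (if l.length ≠ n then false else pvLoopA l) = pvMatchRun l n := by
  induction l generalizing n with
  | nil => cases n <;> simp [pvMatchRun, pvLoopA]
  | cons c cs ih =>
    cases n with
    | zero => simp [pvMatchRun]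
    | succ m =>
      simp only [pvMatchRun, pvLoopA, pv_char_class]
      by_cases hc : (('a' ≤ c && c ≤ 'z') || ('0' ≤ c && c ≤ '9')) = true
      · rw [hc]
        simp only [if_true]
        rw [← ih m]
        simp only [List.length_cons]
        by_cases hl : cs.length = m
        · simp [hl]
        · simp [hl]
      · simp only [Bool.not_eq_true] at hc
        simp [hc]

-- ===== VERDICT (by name: the statement is the Claim_ definition above) =====
theorem checkInstanceId_spec : Claim_equal_checkInstanceId := by
  intro s _
  show checkInstanceId s = checkInstanceId_alt s
  unfold checkInstanceId checkInstanceId_alt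
  exact pv_main s.toList 32
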